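-- pv_equiv track=rewrite | github.com/helali1993/reidemeister_planar_graphs | my_code_1/my_helpers.py | edges_set_creation
-- ===== SOURCE A (Python) =====
-- def edges_set_creation(str_value):
--     if not str_value:
--         return
--
--     edges_set = []
--
--     for i in range(0, len(str_value) - 1):
--         edges_set.append(str_value[i: i+2])
--     edges_set.append(str_value[len(str_value) -1] + str_value[:1])
--
--     return edges_set
-- ===== SOURCE B (Python) =====
-- def edges_set_creation(str_value):
--     if not str_value:
--         return None
--     rotated = str_value[1:] + str_value[:1]
--     return [a + b for a, b in zip(str_value, rotated)]
-- ===== Notes on version B (the rewrite author's own statement) =====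
-- stated objective: idiomatic
-- what changed: Replaces the index loop over range(len-1) plus a special-case wrap-around append with a single zip of the string against its rotation s[1:]+s[:1], so the final cyclic edge is just another pair.
import Mathlib
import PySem

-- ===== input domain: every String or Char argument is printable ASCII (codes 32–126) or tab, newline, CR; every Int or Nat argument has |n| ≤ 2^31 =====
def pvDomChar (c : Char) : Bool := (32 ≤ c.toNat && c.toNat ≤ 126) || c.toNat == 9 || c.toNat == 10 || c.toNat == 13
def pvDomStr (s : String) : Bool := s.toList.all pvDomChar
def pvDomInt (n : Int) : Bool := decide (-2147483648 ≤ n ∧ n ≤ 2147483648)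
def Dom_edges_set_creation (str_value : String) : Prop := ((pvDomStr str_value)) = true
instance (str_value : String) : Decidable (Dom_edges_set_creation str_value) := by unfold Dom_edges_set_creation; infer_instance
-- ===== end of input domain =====

-- B replaces A's index loop + special wrap-around append by zipping the string with its rotation (idiomatic).

-- ===== PORT A =====
-- literal port of A: index loop over range(0, len-1) appending s[i:i+2], then the wrap edge s[-1]+s[:1]
def edges_set_creation (str_value : String) : Option (List String) :=
  let l := str_value.toList
  if l = [] then none
  else
    let n : Int := l.length
    let edges := (PySem.List.pyRange 0 (n - 1) 1).foldl
      (fun acc i => acc ++ [String.ofList (PySem.List.slice l (some i) (some (i + 2)))]) []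
    some (edges ++ [String.ofList (PySem.List.pyGetD l (n - 1) ' ' :: PySem.List.slice l none (some 1))])

-- ===== PORT B =====
-- literal port of B: rotated = s[1:] + s[:1]; [a + b for a, b in zip(s, rotated)]
def edges_set_creation_alt (str_value : String) : Option (List String) :=
  let l := str_value.toList
  if l = [] then none
  else
    let rotated := PySem.List.slice l (some 1) none ++ PySem.List.slice l none (some 1)
    some ((l.zip rotated).map (fun p => String.ofList [p.1, p.2]))

-- ===== PRECONDITION & SPEC =====
def Spec_edges_set_creation (str_value : String) (out : Option (List String)) : Prop := out = edges_set_creation_alt str_value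
instance (str_value : String) (out : Option (List String)) : Decidable (Spec_edges_set_creation str_value out) := by unfold Spec_edges_set_creation; infer_instance

-- ===== CLAIM (what is proved, stated in full; the proofs are below) =====
def Claim_equal_edges_set_creation : Prop := ∀ (str_value : String), Dom_edges_set_creation str_value → Spec_edges_set_creation str_value (edges_set_creation str_value)

-- ===== LEMMAS AND PROOFS =====

theorem edges_main (l : List Char) (h : l ≠ []) :
    ((PySem.List.pyRange 0 ((l.length : Int) - 1) 1).foldl
      (fun acc i => acc ++ [String.ofList (PySem.List.slice l (some i) (some (i + 2)))]) []) ++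
    [String.ofList (PySem.List.pyGetD l ((l.length : Int) - 1) ' ' :: PySem.List.slice l none (some 1))] =
    (l.zip (PySem.List.slice l (some 1) none ++ PySem.List.slice l none (some 1))).map
      (fun p => String.ofList [p.1, p.2]) := by
  have hn : 1 ≤ l.length := List.length_pos_of_ne_nil h
  have htake : l.take 1 = [l[0]] := by
    cases l with
    | nil => exact absurd rfl h
    | cons a t => simp
  rw [PySem.List.foldl_append_singleton_eq_map, List.nil_append,
      PySem.List.slice_from_one]
  have hs1 : PySem.List.slice l none (some (1:Int)) = l.take 1 := by
    norm_num [PySem.List.slice_to]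
  rw [hs1]
  have hcast : ((l.length : Int) - 1) = ((l.length - 1 : Nat) : Int) := by omega
  apply List.ext_getElem
  · simp [PySem.List.length_pyRange_one, List.length_zip, htake]
    omega
  · intro i h1 h2
    have hlen : (PySem.List.pyRange 0 ((l.length : Int) - 1) 1).length = l.length - 1 := by
      simp [PySem.List.length_pyRange_one]
    have hi : i < l.length := by
      simp [hlen] at h1; omega
    rw [List.getElem_map, List.getElem_zip]
    by_cases hc : i < l.length - 1
    · rw [List.getElem_append_left (by simpa [List.length_map, hlen] using hc),
          List.getElem_map, PySem.List.getElem_pyRange_one, zero_add]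
      rw [List.getElem_append_left (by simpa using hc)]
      rw [List.getElem_tail]
      have hslice : PySem.List.slice l (some (i : Int)) (some ((i : Int) + 2)) = [l[i], l[i+1]] := by
        have := PySem.List.slice_natCast_add (xs := l) (j := i) (n := 2)
        rw [show ((i:Int) + 2) = ((i:Int) + ((2:Nat):Int)) by norm_num] at *
        rw [this]
        rw [List.drop_eq_getElem_cons hi]
        have hi1 : i + 1 < l.length := by omega
        rw [List.take_succ_cons, List.drop_eq_getElem_cons hi1, List.take_succ_cons, List.take_zero]
      rw [hslice]
    · have hieq : i = l.length - 1 := by omega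
      subst hieq
      rw [List.getElem_append_right (by simp [List.length_map, hlen])]
      rw [List.getElem_append_right (by simp)]
      simp only [List.length_map, hlen, Nat.sub_self, List.getElem_singleton]
      rw [hcast, PySem.List.pyGetD_natCast]
      congr 1
      simp [htake, hi]

-- ===== VERDICT (by name: the statement is the Claim_ definition above) =====
theorem edges_set_creation_spec : Claim_equal_edges_set_creation := by
  intro s _
  unfold Spec_edges_set_creation edges_set_creation edges_set_creation_alt
  by_cases h : s.toList = []
  · simp [h]
  · simp only [h]
    exact congrArg some (edges_main s.toList h)
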